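-- pv_equiv track=rewrite | github.com/dosisido/AdventOfCode | 2023/12/main.py | isValidBackwards
-- ===== SOURCE A (Python) =====
-- def isValidBackwards(line, occurrences):
--     s = "".join(line[::-1]).split(".")
--     i = len(occurrences)-1
--     for e in reversed(s):
--         if len(e) == 0: continue
--         if i < 0: return False
--         if len(e) != occurrences[i]: return False
--         i -= 1
--     if i != -1: return False
--     return True
-- ===== SOURCE B (Python) =====
-- def isValidBackwards(line, occurrences):
--     # One pass over the characters of the blocks in reversed order, maintaining
--     # the current run length of non-'.' characters; compare the full run list.
--     groups = []
--     run = 0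
--     for block in reversed(line):
--         for c in block:
--             if c == '.':
--                 if run:
--                     groups.append(run)
--                     run = 0
--             else:
--                 run += 1
--     if run:
--         groups.append(run)
--     return groups == list(occurrences)
-- ===== Notes on version B (the rewrite author's own statement) =====
-- stated objective: simpler
-- what changed: B replaces A's join/split('.') plus backward index-walk with early returns by a single forward character scan over the reversed blocks that accumulates run lengths and compares the whole group list to occurrences at once.
import Mathlib
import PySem

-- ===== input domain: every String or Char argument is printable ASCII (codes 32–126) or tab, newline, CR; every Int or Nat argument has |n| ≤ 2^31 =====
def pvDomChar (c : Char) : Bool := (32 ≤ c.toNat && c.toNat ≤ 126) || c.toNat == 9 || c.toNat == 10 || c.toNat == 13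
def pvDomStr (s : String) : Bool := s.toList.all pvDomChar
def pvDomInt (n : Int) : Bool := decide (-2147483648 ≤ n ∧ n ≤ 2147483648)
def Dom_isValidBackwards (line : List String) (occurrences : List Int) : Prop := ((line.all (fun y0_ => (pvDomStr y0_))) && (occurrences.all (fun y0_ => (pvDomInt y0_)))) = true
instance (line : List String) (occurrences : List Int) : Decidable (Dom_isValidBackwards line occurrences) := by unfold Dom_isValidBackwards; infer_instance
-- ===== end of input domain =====

-- B replaces A's join/split('.') + backward index-walk with early returns by a single
-- forward character scan over the reversed blocks accumulating run lengths (simpler decomposition).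


-- ===== PORT A =====
-- the 'for e in reversed(s)' loop of A, with its early returns and the final 'i != -1' check
def pvALoop (occurrences : List Int) : List String → Int → Bool
  | [], i => i == -1
  | e :: rest, i =>
    if PySem.Str.len e == 0 then pvALoop occurrences rest i
    else if i < 0 then false
    else if PySem.Str.len e != (PySem.List.pyGet? occurrences i).getD 0 then false
    else pvALoop occurrences rest (i - 1)

def isValidBackwards (line : List String) (occurrences : List Int) : Bool :=
  -- line[::-1] is list reversal (PySem.List.slice?_none_none_neg_one); '.' ≠ '' so split? is some
  let s := (PySem.Str.split? (PySem.Str.join "" line.reverse) ".").getD []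
  pvALoop occurrences s.reverse ((occurrences.length : Int) - 1)

-- ===== PORT B =====
-- one character step of B's scan: state = (finished group lengths, current run)
def pvBStep (st : List Int × Int) (c : Char) : List Int × Int :=
  if c = '.' then (if st.2 ≠ 0 then (st.1 ++ [st.2], 0) else st) else (st.1, st.2 + 1)

def isValidBackwards_alt (line : List String) (occurrences : List Int) : Bool :=
  let st := line.reverse.foldl (fun st block => block.toList.foldl pvBStep st) ([], 0)
  let groups := if st.2 ≠ 0 then st.1 ++ [st.2] else st.1
  decide (groups = occurrences)

-- ===== PRECONDITION & SPEC =====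
def Spec_isValidBackwards (line : List String) (occurrences : List Int) (out : Bool) : Prop := out = isValidBackwards_alt line occurrences
instance (line : List String) (occurrences : List Int) (out : Bool) : Decidable (Spec_isValidBackwards line occurrences out) := by unfold Spec_isValidBackwards; infer_instance

-- ===== CLAIM (what is proved, stated in full; the proofs are below) =====
def Claim_equal_isValidBackwards : Prop := ∀ (line : List String) (occurrences : List Int), Dom_isValidBackwards line occurrences → Spec_isValidBackwards line occurrences (isValidBackwards line occurrences)

-- ===== LEMMAS AND PROOFS =====

-- run-length groups of a character list, starting with a partial run `run`
def pvGroups (run : Int) : List Char → List Int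
  | [] => if run ≠ 0 then [run] else []
  | c :: cs => if c = '.' then (if run ≠ 0 then run :: pvGroups 0 cs else pvGroups 0 cs) else pvGroups (run + 1) cs

-- split pieces produced from a reversed current piece `cur` and the remaining input
def pvPieces : List Char → List Char → List (List Char)
  | cur, [] => [cur.reverse]
  | cur, c :: rest => if c = '.' then cur.reverse :: pvPieces [] rest else pvPieces (c :: cur) rest

-- lengths of the nonempty pieces, as Ints
def pvLens (l : List (List Char)) : List Int :=
  (l.filter (fun p => p.length ≠ 0)).map (fun p => (p.length : Int))

theorem pvGo_spec : ∀ (fuel : Nat) (l cur : List Char) (acc : List (List Char)) (_ : l.length < fuel),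
    PySem.Chars.splitOn.go ['.'] fuel l cur acc = acc.reverse ++ pvPieces cur l := by
  intro fuel
  induction fuel with
  | zero => intro l cur acc h; omega
  | succ n ih =>
    intro l cur acc h
    cases l with
    | nil => simp [PySem.Chars.splitOn.go, pvPieces]
    | cons c rest =>
      rw [PySem.Chars.splitOn.go]
      by_cases hc : c = '.'
      · subst hc
        have hp : List.isPrefixOf ['.'] ('.' :: rest) = true := by
          simp [List.isPrefixOf]
        simp only [hp, if_pos]
        rw [ih]
        · simp [pvPieces]
        · simp at h ⊢; omega
      · have hp : List.isPrefixOf ['.'] (c :: rest) = false := by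
          simp [List.isPrefixOf]; exact fun a => absurd a.symm hc
        simp only [hp, Bool.false_eq_true, if_neg, not_false_iff]
        rw [ih]
        · simp [pvPieces, hc]
        · simp at h; omega

theorem pvLens_cons (p : List Char) (l : List (List Char)) :
    pvLens (p :: l) = (if p.length ≠ 0 then [(p.length : Int)] else []) ++ pvLens l := by
  by_cases h : p = [] <;> simp [pvLens, List.filter_cons, h]

theorem pvLens_nil : pvLens [] = [] := rfl

theorem pvPieces_lens : ∀ (l cur : List Char),
    pvLens (pvPieces cur l) = pvGroups (cur.length : Int) l := by
  intro l
  induction l with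
  | nil =>
    intro cur
    by_cases hc : cur.length = 0
    · have : (cur.length : Int) = 0 := by exact_mod_cast hc
      simp [pvPieces, pvGroups, pvLens_cons, pvLens_nil, hc, this]
    · have : (cur.length : Int) ≠ 0 := by exact_mod_cast hc
      simp [pvPieces, pvGroups, pvLens_cons, pvLens_nil, hc, this]
  | cons c rest ih =>
    intro cur
    by_cases hc : c = '.'
    · subst hc
      by_cases h0 : cur.length = 0
      · have : (cur.length : Int) = 0 := by exact_mod_cast h0
        simp [pvPieces, pvGroups, pvLens_cons, h0, this, ih []]
      · have : (cur.length : Int) ≠ 0 := by exact_mod_cast h0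
        simp [pvPieces, pvGroups, pvLens_cons, h0, this, ih []]
    · have h2 := ih (c :: cur)
      simp only [List.length_cons] at h2
      simp [pvPieces, pvGroups, hc, h2]

theorem pvB_fold : ∀ (cs : List Char) (gs : List Int) (run : Int),
    (let st := cs.foldl pvBStep (gs, run)
     if st.2 ≠ 0 then st.1 ++ [st.2] else st.1) = gs ++ pvGroups run cs := by
  intro cs
  induction cs with
  | nil => intro gs run; by_cases h : run = 0 <;> simp [pvGroups, h]
  | cons c rest ih =>
    intro gs run
    by_cases hc : c = '.'
    · subst hc
      by_cases h : run = 0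
      · simp [pvBStep, pvGroups, h, ih]
      · simp only [List.foldl_cons, pvBStep, if_pos rfl, if_pos h, ne_eq, h, not_false_iff, if_true]
        simp [pvGroups, h, ih]
      -- fallthrough
    · simp [pvBStep, pvGroups, hc, ih]

theorem pvALoop_spec (occ : List Int) : ∀ (l : List String) (k : Nat) (_ : k ≤ occ.length),
    pvALoop occ l ((k : Int) - 1)
      = decide ((l.filter (fun e => e.toList.length ≠ 0)).map (fun e => (e.toList.length : Int)) = (occ.take k).reverse) := by
  intro l
  induction l with
  | nil =>
    intro k hk
    rcases Nat.eq_zero_or_pos k with h | h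
    · subst h; simp [pvALoop]
    · have h2 : occ.take k ≠ [] := by
        intro hnil
        rcases List.take_eq_nil_iff.mp hnil with h' | h'
        · omega
        · subst h'; simp at hk; omega
      have h1 : ((k : Int) - 1 == -1) = false := by simp; omega
      simp only [pvALoop, h1, List.filter_nil, List.map_nil]
      have : ¬ (([] : List Int) = (occ.take k).reverse) := by
        intro h'
        exact h2 (by simpa using h'.symm)
      simp [this]
  | cons e rest ih =>
    intro k hk
    by_cases he : e.toList.length = 0
    · have he' : e = "" := by simpa using he
      have hl : PySem.Str.len e == 0 := by simp [PySem.Str.len, he']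
      have hfil0 : List.filter (fun e => decide (e.toList.length ≠ 0)) (e :: rest)
          = List.filter (fun e => decide (e.toList.length ≠ 0)) rest := by
        simp [List.filter_cons, he']
      simp only [pvALoop, hl, if_pos]
      rw [ih _ hk, hfil0]
    · have he' : ¬ e = "" := by simpa using he
      have hne : (PySem.Str.len e == 0) = false := by
        simp [PySem.Str.len, he']
      have hfil : List.filter (fun e => decide (e.toList.length ≠ 0)) (e :: rest)
          = e :: List.filter (fun e => decide (e.toList.length ≠ 0)) rest := by
        simp [List.filter_cons, he']
      rcases Nat.eq_zero_or_pos k with h | h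
      · subst h
        have hlt : (((0:Nat) : Int) - 1 < 0) := by omega
        simp only [pvALoop, hne, Bool.false_eq_true, if_neg, not_false_iff, if_pos hlt]
        rw [hfil]
        simp
      · obtain ⟨j, rfl⟩ : ∃ j, k = j + 1 := ⟨k - 1, by omega⟩
        have hj : j < occ.length := by omega
        have hneg : ¬ (((j + 1 : Nat) : Int) - 1 < 0) := by push_cast; omega
        have hget : (PySem.List.pyGet? occ (((j + 1 : Nat) : Int) - 1)).getD 0 = occ[j] := by
          have h3 : (((j + 1 : Nat) : Int) - 1) = ((j : Nat) : Int) := by push_cast; omega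
          rw [h3, PySem.List.pyGet?_natCast, List.getElem?_eq_getElem hj]
          rfl
        have htake : (occ.take (j+1)).reverse = occ[j] :: (occ.take j).reverse := by
          rw [List.take_add_one]
          simp [List.getElem?_eq_getElem hj]
        have hstep : pvALoop occ (e :: rest) (((j + 1 : Nat) : Int) - 1)
            = if (PySem.Str.len e != (PySem.List.pyGet? occ (((j + 1 : Nat) : Int) - 1)).getD 0) then false
              else pvALoop occ rest ((((j + 1 : Nat) : Int) - 1) - 1) := by
          simp only [pvALoop, hne, Bool.false_eq_true, if_neg, not_false_iff, if_neg hneg]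
        rw [hstep, hfil, htake]
        have h4 : ((((j + 1 : Nat) : Int) - 1) - 1) = ((j : Nat) : Int) - 1 := by push_cast; omega
        rw [h4, ih j (by omega)]
        by_cases heq : (e.toList.length : Int) = occ[j]
        · have heq' : ((e.length : Nat) : Int) = occ[j] := by simpa using heq
          have : (PySem.Str.len e != (PySem.List.pyGet? occ (((j + 1 : Nat) : Int) - 1)).getD 0) = false := by
            rw [hget]; simp [PySem.Str.len, heq']
          rw [this]
          simp [heq']
        · have heq' : ¬ (((e.length : Nat) : Int) = occ[j]) := by
            intro hq; exact heq (by simpa using hq)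
          have : (PySem.Str.len e != (PySem.List.pyGet? occ (((j + 1 : Nat) : Int) - 1)).getD 0) = true := by
            rw [hget]; simp [PySem.Str.len]; exact heq'
          rw [this]
          simp [heq']

theorem pvJoin_nil_eq_flatten : ∀ (parts : List (List Char)), PySem.Chars.join [] parts = parts.flatten := by
  intro parts
  induction parts with
  | nil => rfl
  | cons p rest ih =>
    cases rest with
    | nil => simp [PySem.Chars.join, List.intercalate]
    | cons q t =>
      simp only [PySem.Chars.join, List.intercalate, List.intersperse] at ih ⊢
      simp [ih]

theorem pv_main (line : List String) (occurrences : List Int) :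
    isValidBackwards line occurrences = isValidBackwards_alt line occurrences := by
  have hdot : (".").toList = ['.'] := by decide
  have hsplit : PySem.Str.split? (PySem.Str.join "" line.reverse) "."
      = some ((PySem.Chars.splitOn (PySem.Str.join "" line.reverse).toList ['.']).map String.ofList) := by
    simp [PySem.Str.split?, PySem.Chars.split?, hdot]
  set J := (PySem.Str.join "" line.reverse).toList with hJ
  have hson : PySem.Chars.splitOn J ['.'] = pvPieces [] J := by
    have := pvGo_spec (J.length + 1) J [] [] (by omega)
    simpa [PySem.Chars.splitOn] using this
  have hA : isValidBackwards line occurrences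
      = decide (pvLens (pvPieces [] J) = occurrences) := by
    show pvALoop occurrences ((PySem.Str.split? (PySem.Str.join "" line.reverse) ".").getD []).reverse
        ((occurrences.length : Int) - 1) = _
    rw [hsplit]
    simp only [Option.getD_some]
    rw [pvALoop_spec occurrences _ occurrences.length (le_refl _)]
    rw [List.take_length]
    have hrev : ∀ (l : List String),
        (l.reverse.filter (fun e => e.toList.length ≠ 0)).map (fun e => (e.toList.length : Int))
          = ((l.filter (fun e => e.toList.length ≠ 0)).map (fun e => (e.toList.length : Int))).reverse := by
      intro l; simp
    rw [hrev]
    have hmap : (((PySem.Chars.splitOn J ['.']).map String.ofList).filter (fun e => e.toList.length ≠ 0)).map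
        (fun e => (e.toList.length : Int)) = pvLens (PySem.Chars.splitOn J ['.']) := by
      simp [pvLens, List.filter_map, List.map_map, Function.comp_def]
    rw [hmap, hson]
    simp [List.reverse_inj]
  have hB : isValidBackwards_alt line occurrences
      = decide (pvGroups 0 J = occurrences) := by
    show decide _ = _
    have hflat : J = (line.reverse.map String.toList).flatten := by
      rw [hJ, PySem.Str.toList_join]
      have : ("" : String).toList = [] := by decide
      rw [this, pvJoin_nil_eq_flatten]
    have hfold : line.reverse.foldl (fun st block => block.toList.foldl pvBStep st) (([], 0) : List Int × Int)
        = J.foldl pvBStep ([], 0) := by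
      rw [hflat, List.foldl_flatten, List.foldl_map]
    rw [hfold]
    have h2 := pvB_fold J [] 0
    simp only at h2
    rw [h2]
    simp
  rw [hA, hB]
  rw [pvPieces_lens]
  norm_num

-- ===== VERDICT (by name: the statement is the Claim_ definition above) =====
theorem isValidBackwards_spec : Claim_equal_isValidBackwards := by
  intro line occurrences _
  unfold Spec_isValidBackwards
  exact pv_main line occurrences
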